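-- pv_equiv track=rewrite | github.com/tristanang/comp211 | problem2codejam.py | sdc
-- ===== SOURCE A (Python) =====
-- def sdc(n):
--     stringed = str(n)
--     if len(stringed) == 1:
--         return True
--     elif stringed[0] == stringed[1]:
--         return sdc(int(stringed[1:]))
--     else:
--         return False
-- ===== SOURCE B (Python) =====
-- def sdc(n):
--     s = str(n)
--     return all(c == s[0] for c in s)
-- ===== Notes on version B (the rewrite author's own statement) =====
-- stated objective: simpler
-- what changed: Replaces the recursive re-parse (str -> int on the suffix at every step) with a single linear scan of str(n) checking every character against the first.
import Mathlib
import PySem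

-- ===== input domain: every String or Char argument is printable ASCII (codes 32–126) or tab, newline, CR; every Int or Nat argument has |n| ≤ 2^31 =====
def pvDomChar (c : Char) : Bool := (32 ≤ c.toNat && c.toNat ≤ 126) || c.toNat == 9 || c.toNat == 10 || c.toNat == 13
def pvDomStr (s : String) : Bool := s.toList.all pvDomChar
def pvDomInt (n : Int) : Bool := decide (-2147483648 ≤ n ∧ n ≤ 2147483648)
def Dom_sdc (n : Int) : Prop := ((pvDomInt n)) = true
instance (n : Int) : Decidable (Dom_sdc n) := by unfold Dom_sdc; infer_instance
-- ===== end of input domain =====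

-- B replaces A's recursive suffix re-parse (str -> int at every level) by a single scan of str(n)
-- comparing every character with the first; objective: simpler.

-- ===== PORT A =====
-- Hand port of Python `int(s)` exact on the strings this call site can pass: A only parses
-- `str(n)[1:]` after `str(n)[0] == str(n)[1]`, which forces a nonempty all-digit string;
-- on those `int` returns the decimal value (none = ValueError, unreachable here).
def pyIntDigits? (cs : List Char) : Option Nat :=
  if cs ≠ [] ∧ cs.all Char.isDigit then
    some (cs.foldl (fun a c => 10 * a + (c.toNat - 48)) 0)
  else none

-- the fuel only makes the recursion `sdc(int(str(n)[1:]))` structural; it never runs out,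
-- since each recursive call strictly shortens str(n) (proved in `sdcGo_eq` below)
def sdcGo : Nat → Int → Bool
  | 0, _ => false
  | fuel+1, n =>
    let s := PySem.Int.toChars n
    if s.length == 1 then true
    else if PySem.List.pyGet? s 0 == PySem.List.pyGet? s 1 then
      match pyIntDigits? (PySem.List.slice s (some 1) none) with
      | some m => sdcGo fuel (m : Int)
      | none => false
    else false

def sdc (n : Int) : Bool := sdcGo (PySem.Int.toChars n).length n

-- ===== PORT B =====
def sdc_alt (n : Int) : Bool :=
  let s := PySem.Int.toChars n
  s.all (fun c => c == s.headD ' ')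

-- ===== PRECONDITION & SPEC =====
def Spec_sdc (n : Int) (out : Bool) : Prop := out = sdc_alt n
instance (n : Int) (out : Bool) : Decidable (Spec_sdc n out) := by unfold Spec_sdc; infer_instance

-- ===== CLAIM (what is proved, stated in full; the proofs are below) =====
def Claim_equal_sdc : Prop := ∀ (n : Int), Dom_sdc n → Spec_sdc n (sdc n)

-- ===== LEMMAS AND PROOFS =====

lemma tdc_eq : ∀ (f n : ℕ), 0 < n → n < f → ∀ ds,
    Nat.toDigitsCore 10 f n ds = ((Nat.digits 10 n).map Nat.digitChar).reverse ++ ds := by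
  intro f
  induction f with
  | zero => intro n h0 hf ds; omega
  | succ f ih =>
    intro n h0 hf ds
    by_cases hq : n / 10 = 0
    · have hn10 : n < 10 := by omega
      have hdig : Nat.digits 10 n = [n] := by
        rw [Nat.digits_def' (by norm_num) h0]
        simp [Nat.mod_eq_of_lt hn10, Nat.div_eq_of_lt hn10]
      simp [Nat.toDigitsCore, hq, hdig, Nat.mod_eq_of_lt hn10]
    · have h1 : 0 < n / 10 := Nat.pos_of_ne_zero hq
      have h2 : n / 10 < f := lt_of_lt_of_le (Nat.div_lt_self h0 (by norm_num)) (by omega)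
      rw [show Nat.toDigitsCore 10 (f+1) n ds
            = Nat.toDigitsCore 10 f (n / 10) (Nat.digitChar (n % 10) :: ds) by
          simp [Nat.toDigitsCore, hq]]
      rw [ih (n / 10) h1 h2]
      rw [Nat.digits_def' (by norm_num) h0]
      simp [List.reverse_cons, List.append_assoc]

lemma toDigits10 (n : ℕ) (h : n ≠ 0) :
    Nat.toDigits 10 n = ((Nat.digits 10 n).map Nat.digitChar).reverse := by
  unfold Nat.toDigits
  rw [tdc_eq (n+1) n (Nat.pos_of_ne_zero h) (by omega) []]
  simp

lemma isDigit_digitChar {d : ℕ} (h : d < 10) : (Nat.digitChar d).isDigit = true := by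
  interval_cases d <;> decide

lemma toNat_digitChar {d : ℕ} (h : d < 10) : (Nat.digitChar d).toNat - 48 = d := by
  interval_cases d <;> decide

lemma digitChar_ne_dash {d : ℕ} (h : d < 10) : Nat.digitChar d ≠ '-' := by
  interval_cases d <;> decide

lemma digitChar_inj {d e : ℕ} (hd : d < 10) (he : e < 10)
    (hc : Nat.digitChar d = Nat.digitChar e) : d = e := by
  have h1 := toNat_digitChar hd
  have h2 := toNat_digitChar he
  rw [hc] at h1
  omega

lemma foldr_val (D : List ℕ) (h : ∀ d ∈ D, d < 10) :
    D.foldr (fun d a => 10 * a + ((Nat.digitChar d).toNat - 48)) 0 = Nat.ofDigits 10 D := by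
  induction D with
  | nil => simp [Nat.ofDigits_nil]
  | cons d D ih =>
    have hd := h d (by simp)
    have hD : ∀ x ∈ D, x < 10 := fun x hx => h x (by simp [hx])
    simp only [List.foldr_cons, Nat.ofDigits_cons, ih hD, toNat_digitChar hd]
    ring

lemma parse_digits (D : List ℕ) (hne : D ≠ []) (h : ∀ d ∈ D, d < 10) :
    pyIntDigits? ((D.map Nat.digitChar).reverse) = some (Nat.ofDigits 10 D) := by
  have hall : ((D.map Nat.digitChar).reverse).all Char.isDigit = true := by
    simp only [List.all_eq_true, List.mem_reverse, List.mem_map]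
    rintro c ⟨d, hd, rfl⟩
    exact isDigit_digitChar (h d hd)
  have hne' : (D.map Nat.digitChar).reverse ≠ [] := by simpa using hne
  unfold pyIntDigits?
  rw [if_pos ⟨hne', hall⟩]
  congr 1
  rw [List.foldl_reverse, List.foldr_map]
  exact foldr_val D h

lemma toChars_natCast (M : ℕ) : PySem.Int.toChars (M : ℤ) = Nat.toDigits 10 M := by
  simp [PySem.Int.toChars]

lemma toDigits10_ne_nil (k : ℕ) : Nat.toDigits 10 k ≠ [] := by
  rcases Nat.eq_zero_or_pos k with rfl | hk
  · decide
  · rw [toDigits10 k (by omega)]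
    simp only [ne_eq, List.reverse_eq_nil_iff, List.map_eq_nil_iff, Nat.digits_ne_nil_iff_ne_zero]
    omega

lemma toChars_ne_nil (n : ℤ) : PySem.Int.toChars n ≠ [] := by
  unfold PySem.Int.toChars
  split
  · simp
  · exact toDigits10_ne_nil _

lemma sdcGo_eq : ∀ (f : ℕ) (n : ℤ), (PySem.Int.toChars n).length ≤ f → sdcGo f n = sdc_alt n := by
  intro f
  induction f with
  | zero =>
    intro n hl
    exact absurd (List.length_eq_zero_iff.mp (Nat.le_zero.mp hl)) (toChars_ne_nil n)
  | succ f ih =>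
    intro n hl
    obtain ⟨c, t, hs0⟩ := List.exists_cons_of_ne_nil (toChars_ne_nil n)
    by_cases hlen : (PySem.Int.toChars n).length = 1
    · have ht : t = [] := by
        rw [hs0] at hlen; simpa using hlen
      subst ht
      simp [sdcGo, sdc_alt, hs0]
    · by_cases hneg : n < 0
      · -- negative n: str(n) = '-' followed by digits; '-' differs from the first digit
        have hA : n.natAbs ≠ 0 := by omega
        obtain hD | ⟨E, dL, hD⟩ := List.eq_nil_or_concat (Nat.digits 10 n.natAbs)
        · exact absurd hD (Nat.digits_ne_nil_iff_ne_zero.mpr hA)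
        have hs : PySem.Int.toChars n
            = '-' :: Nat.digitChar dL :: (E.map Nat.digitChar).reverse := by
          unfold PySem.Int.toChars
          rw [if_pos hneg, toDigits10 _ hA, hD]
          simp
        have hdL : dL < 10 := Nat.digits_lt_base (by norm_num) (by rw [hD]; simp)
        rw [sdcGo, hs]
        simp only [sdc_alt, hs]
        simp [digitChar_ne_dash hdL, Ne.symm (digitChar_ne_dash hdL)]
      · -- nonnegative n with at least two digits
        have hN : n.toNat ≠ 0 := by
          intro h0
          apply hlen
          have : PySem.Int.toChars n = ['0'] := by
            unfold PySem.Int.toChars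
            rw [if_neg (by omega), h0]
            decide
          simp [this]
        obtain hD | ⟨E, dL, hD⟩ := List.eq_nil_or_concat (Nat.digits 10 n.toNat)
        · exact absurd hD (Nat.digits_ne_nil_iff_ne_zero.mpr hN)
        obtain hE | ⟨F, dM, hE⟩ := List.eq_nil_or_concat E
        · exfalso
          apply hlen
          unfold PySem.Int.toChars
          rw [if_neg (by omega), toDigits10 _ hN, hD, hE]
          simp
        subst hE
        have hs : PySem.Int.toChars n
            = Nat.digitChar dL :: Nat.digitChar dM :: (F.map Nat.digitChar).reverse := by
          unfold PySem.Int.toChars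
          rw [if_neg (by omega), toDigits10 _ hN, hD]
          simp
        have hmemD : ∀ d ∈ Nat.digits 10 n.toNat, d < 10 :=
          fun d hd => Nat.digits_lt_base (by norm_num) hd
        have hdL : dL < 10 := hmemD dL (by rw [hD]; simp)
        have hdM : dM < 10 := hmemD dM (by rw [hD]; simp)
        have hF : ∀ d ∈ F ++ [dM], d < 10 := fun d hd => hmemD d (by rw [hD]; simp at hd ⊢; tauto)
        have hdL0 : dL ≠ 0 := by
          have hne : Nat.digits 10 n.toNat ≠ [] := Nat.digits_ne_nil_iff_ne_zero.mpr hN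
          have h4 := Nat.getLast_digit_ne_zero 10 hN
          have h5 : (Nat.digits 10 n.toNat).getLast hne = dL := by
            simp only [hD, List.concat_eq_append]
            simp
          rw [← h5]
          exact h4
        by_cases hc : Nat.digitChar dL = Nat.digitChar dM
        · -- first two characters equal: A recurses on int(str(n)[1:])
          have hdM0 : dM ≠ 0 := by
            have := digitChar_inj hdL hdM hc; omega
          have hparse := parse_digits (F ++ [dM]) (by simp) hF
          have hrev : ((F ++ [dM]).map Nat.digitChar).reverse
              = Nat.digitChar dM :: (F.map Nat.digitChar).reverse := by simp
          have hdigs : Nat.digits 10 (Nat.ofDigits 10 (F ++ [dM])) = F ++ [dM] := by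
            refine Nat.digits_ofDigits 10 (by norm_num) _ hF ?_
            intro h'
            simpa [List.getLast_concat] using hdM0
          have hM0 : Nat.ofDigits 10 (F ++ [dM]) ≠ 0 := by
            intro h0
            rw [h0] at hdigs
            simp at hdigs
          have hMchars : PySem.Int.toChars ((Nat.ofDigits 10 (F ++ [dM]) : ℕ) : ℤ)
              = Nat.digitChar dM :: (F.map Nat.digitChar).reverse := by
            rw [toChars_natCast, toDigits10 _ hM0, hdigs, hrev]
          have hlM : (PySem.Int.toChars ((Nat.ofDigits 10 (F ++ [dM]) : ℕ) : ℤ)).length ≤ f := by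
            rw [hMchars]
            rw [hs] at hl
            simp at hl ⊢
            omega
          have hIH := ih _ hlM
          rw [sdcGo, hs]
          simp only [List.length_cons, PySem.List.slice_from_one, List.tail_cons]
          rw [show (((F.map Nat.digitChar).reverse.length + 1 + 1 == 1) : Bool) = false by simp]
          simp only [Bool.false_eq_true, if_false]
          rw [show (PySem.List.pyGet? (Nat.digitChar dL :: Nat.digitChar dM ::
                (F.map Nat.digitChar).reverse) 0
              == PySem.List.pyGet? (Nat.digitChar dL :: Nat.digitChar dM ::
                (F.map Nat.digitChar).reverse) 1) = true by
            simp [hc]]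
          simp only [if_true]
          rw [← hrev, hparse]
          show sdcGo f ((Nat.ofDigits 10 (F ++ [dM]) : ℕ) : ℤ) = sdc_alt n
          rw [hIH]
          simp only [sdc_alt, hs, hMchars]
          simp [hc]
        · -- first two characters differ: both sides are False
          rw [sdcGo, hs]
          simp only [sdc_alt, hs]
          simp [hc, Ne.symm hc]

-- ===== VERDICT (by name: the statement is the Claim_ definition above) =====
theorem sdc_spec : Claim_equal_sdc := by
  intro n _
  unfold Spec_sdc sdc
  exact sdcGo_eq _ n le_rfl
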